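-- pv_equiv track=rewrite | github.com/Ignacio-Ibarra/text_mining_squared | CleaningRE.py | remove_digits
-- ===== SOURCE A (Python) =====
-- from functools import reduce
--
-- def remove_digits(text):
--   splitted = text.split(' ')
--   cleanned = []
--   for word in splitted:
--     evaluation = [1 if i.isdigit() else 0 for i in word]
--     suma = reduce(lambda x,y: x+y, evaluation,0)
--     if suma==0:
--       cleanned.append(word)
--     elif suma<2:
--       cleanned.append(word)
--     else:
--       word = ''.join([i for i in word if not i.isdigit()])
--       cleanned.append(word)
--   return " ".join(cleanned)
-- ===== SOURCE B (Python) =====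
-- def _repl(tok):
--     if sum(1 for c in tok if c.isdigit()) >= 2:
--         return [c for c in tok if not c.isdigit()]
--     return tok
--
-- def remove_digits(text):
--     out = []
--     tok = []
--     for ch in text:
--         if ch == ' ':
--             out.extend(_repl(tok))
--             out.append(' ')
--             tok = []
--         else:
--             tok.append(ch)
--     out.extend(_repl(tok))
--     return ''.join(out)
-- ===== Notes on version B (the rewrite author's own statement) =====
-- stated objective: alternative
-- what changed: Replaces split-on-space / per-word list building / rejoin with a single left-to-right character scan that copies spaces through directly and flushes each accumulated non-space token (digit-stripped when it holds two or more digits) into the output.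
import Mathlib
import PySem

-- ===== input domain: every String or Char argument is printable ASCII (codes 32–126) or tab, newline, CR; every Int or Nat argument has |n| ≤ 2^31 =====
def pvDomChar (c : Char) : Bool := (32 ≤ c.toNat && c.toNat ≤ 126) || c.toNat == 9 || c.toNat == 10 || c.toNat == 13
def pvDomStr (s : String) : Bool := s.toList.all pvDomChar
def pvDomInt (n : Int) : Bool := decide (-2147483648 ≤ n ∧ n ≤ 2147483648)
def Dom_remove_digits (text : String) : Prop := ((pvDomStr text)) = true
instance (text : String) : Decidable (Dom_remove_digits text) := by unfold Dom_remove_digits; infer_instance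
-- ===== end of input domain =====

-- B replaces A's split-on-space / per-word rebuild / rejoin with a single left-to-right
-- scan flushing each non-space token into the output (objective: alternative, same cost).

-- ===== PORT A =====
def remove_digits (text : String) : String :=
  let splitted := PySem.Chars.splitOn text.toList [' ']
  let cleanned := splitted.foldl (fun acc word =>
      let evaluation := word.map (fun i => if PySem.Chars.isdigit i then (1 : Int) else 0)
      let suma := evaluation.foldl (fun x y => x + y) 0
      if suma == 0 then acc ++ [word]
      else if suma < 2 then acc ++ [word]
      else acc ++ [word.filter (fun i => !PySem.Chars.isdigit i)]) []
  String.ofList (PySem.Chars.join [' '] cleanned)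

-- ===== PORT B =====
-- per-token rewrite (_repl in Source B)
def pvRepl (tok : List Char) : List Char :=
  if 2 ≤ tok.countP PySem.Chars.isdigit then tok.filter (fun c => !PySem.Chars.isdigit c)
  else tok

def remove_digits_alt (text : String) : String :=
  let st := text.toList.foldl
    (fun (st : List Char × List Char) ch =>
      if ch = ' ' then (st.1 ++ pvRepl st.2 ++ [' '], [])
      else (st.1, st.2 ++ [ch])) ([], [])
  String.ofList (st.1 ++ pvRepl st.2)

-- ===== PRECONDITION & SPEC =====
def Spec_remove_digits (text : String) (out : String) : Prop := out = remove_digits_alt text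
instance (text : String) (out : String) : Decidable (Spec_remove_digits text out) := by unfold Spec_remove_digits; infer_instance

-- ===== CLAIM (what is proved, stated in full; the proofs are below) =====
def Claim_equal_remove_digits : Prop := ∀ (text : String), Dom_remove_digits text → Spec_remove_digits text (remove_digits text)

-- ===== LEMMAS AND PROOFS =====

-- structural characterisation of splitting on a single space
def pvG (cur : List Char) : List Char → List (List Char)
  | [] => [cur.reverse]
  | c :: rest => if c = ' ' then cur.reverse :: pvG [] rest else pvG (c :: cur) rest

theorem pvG_ne_nil (l cur : List Char) : pvG cur l ≠ [] := by
  induction l generalizing cur with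
  | nil => simp [pvG]
  | cons c rest ih => by_cases h : c = ' ' <;> simp [pvG, h, ih]

theorem pvSplitOn_go (fuel : Nat) :
    ∀ (l cur : List Char) (acc : List (List Char)), l.length < fuel →
      PySem.Chars.splitOn.go [' '] fuel l cur acc = acc.reverse ++ pvG cur l := by
  induction fuel with
  | zero => intro l cur acc h; omega
  | succ n ih =>
    intro l cur acc h
    cases l with
    | nil => simp [PySem.Chars.splitOn.go, pvG]
    | cons c rest =>
      by_cases hc : c = ' '
      · subst hc
        rw [show PySem.Chars.splitOn.go [' '] (n+1) (' ' :: rest) cur acc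
              = PySem.Chars.splitOn.go [' '] n rest [] (cur.reverse :: acc) by
            simp [PySem.Chars.splitOn.go, List.isPrefixOf]]
        rw [ih rest [] (cur.reverse :: acc) (by simpa using Nat.lt_of_succ_lt_succ h)]
        simp [pvG]
      · rw [show PySem.Chars.splitOn.go [' '] (n+1) (c :: rest) cur acc
              = PySem.Chars.splitOn.go [' '] n rest (c :: cur) acc by
            simp [PySem.Chars.splitOn.go, List.isPrefixOf, Ne.symm hc]]
        rw [ih rest (c :: cur) acc (by simpa using Nat.lt_of_succ_lt_succ h)]
        simp [pvG, hc]

theorem pvSplitOn_eq (cs : List Char) : PySem.Chars.splitOn cs [' '] = pvG [] cs := by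
  rw [PySem.Chars.splitOn, pvSplitOn_go (cs.length + 1) cs [] [] (by omega)]
  simp

-- A's per-word processing equals B's pvRepl
theorem pvWord_eq (w : List Char) :
    (let evaluation := w.map (fun i => if PySem.Chars.isdigit i then (1 : Int) else 0)
     let suma := evaluation.foldl (fun x y => x + y) 0
     if suma == 0 then w
     else if suma < 2 then w
     else w.filter (fun i => !PySem.Chars.isdigit i)) = pvRepl w := by
  have hsum : (w.map (fun i => if PySem.Chars.isdigit i then (1 : Int) else 0)).foldl
      (fun x y => x + y) 0 = ((w.countP PySem.Chars.isdigit : Nat) : Int) := by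
    rw [← List.sum_eq_foldl, PySem.List.sum_map_ite_one_zero]
  simp only [hsum, pvRepl, beq_iff_eq]
  split_ifs with h1 h2 h3 h4 <;> first | rfl | (exfalso; omega)

-- B's fold, run from an arbitrary state, produces out ++ the joined processed split
theorem pvFold_spec (l : List Char) :
    ∀ (out tok : List Char),
      (l.foldl (fun (st : List Char × List Char) ch =>
          if ch = ' ' then (st.1 ++ pvRepl st.2 ++ [' '], [])
          else (st.1, st.2 ++ [ch])) (out, tok)).1
        ++ pvRepl (l.foldl (fun (st : List Char × List Char) ch =>
          if ch = ' ' then (st.1 ++ pvRepl st.2 ++ [' '], [])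
          else (st.1, st.2 ++ [ch])) (out, tok)).2
      = out ++ PySem.Chars.join [' '] ((pvG tok.reverse l).map pvRepl) := by
  induction l with
  | nil => intro out tok; simp [pvG, PySem.Chars.join_singleton]
  | cons c rest ih =>
    intro out tok
    by_cases hc : c = ' '
    · subst hc
      simp only [List.foldl_cons, reduceIte]
      rw [ih (out ++ pvRepl tok ++ [' ']) []]
      have hne := pvG_ne_nil rest []
      obtain ⟨q, L, hq⟩ : ∃ q L, pvG [] rest = q :: L := by
        cases h : pvG [] rest with
        | nil => exact absurd h hne
        | cons q L => exact ⟨q, L, rfl⟩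
      simp [pvG, hq, PySem.Chars.join_cons_cons]
    · simp only [List.foldl_cons, if_neg hc]
      rw [ih out (tok ++ [c])]
      simp [pvG, hc]

-- the two ports agree on every string
theorem pvPorts_eq (text : String) : remove_digits text = remove_digits_alt text := by
  have hfun : (fun (acc : List (List Char)) (word : List Char) =>
      let evaluation := word.map (fun i => if PySem.Chars.isdigit i then (1 : Int) else 0)
      let suma := evaluation.foldl (fun x y => x + y) 0
      if suma == 0 then acc ++ [word]
      else if suma < 2 then acc ++ [word]
      else acc ++ [word.filter (fun i => !PySem.Chars.isdigit i)])
      = (fun acc word => acc ++ [pvRepl word]) := by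
    funext acc w
    have h := pvWord_eq w
    simp only at h ⊢
    split_ifs at h ⊢ <;> rw [← h]
  simp only [remove_digits, remove_digits_alt]
  rw [pvSplitOn_eq, hfun, PySem.List.foldl_append_singleton_eq_map]
  have hB := pvFold_spec text.toList [] []
  simp only [List.reverse_nil, List.nil_append] at hB
  rw [List.nil_append, hB]

-- ===== VERDICT (by name: the statement is the Claim_ definition above) =====
theorem remove_digits_spec : Claim_equal_remove_digits := by
  intro text _
  unfold Spec_remove_digits
  exact pvPorts_eq text
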